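-- pv_equiv track=rewrite | github.com/Parkbyounghyo/nori-ai-java | nori-collector/collectors/egov_collector.py | _prioritize_egov_files
-- ===== SOURCE A (Python) =====
-- def _prioritize_egov_files(files: list[str]) -> list[str]:
--     """eGov 파일 우선순위 정렬"""
--     priority_keywords = {
--         # 최고 우선순위 — 설정 파일
--         3: ["context-", "web.xml", "dispatcher-servlet", ".properties",
--             "application.yml", "application.yaml", "pom.xml", "build.gradle"],
--         # 높은 우선순위 — 핵심 레이어
--         2: ["Controller", "Service", "ServiceImpl", "Dao", "DAO",
--             "Mapper", "Vo", "VO", "impl/", "Impl"],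
--         # 보통 — 공통컴포넌트
--         1: ["Egov", "egov", "common/", "cmm/", "util/"],
--     }
--
--     def file_priority(path: str) -> int:
--         for priority, keywords in priority_keywords.items():
--             if any(kw in path for kw in keywords):
--                 return priority
--         return 0
--
--     return sorted(files, key=file_priority, reverse=True)
-- ===== SOURCE B (Python) =====
-- def _prioritize_egov_files(files: list[str]) -> list[str]:
--     """eGov 파일 우선순위 정렬 — four staged filter passes instead of a comparison sort."""
--     config_kws = ["context-", "web.xml", "dispatcher-servlet", ".properties",
--                   "application.yml", "application.yaml", "pom.xml", "build.gradle"]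
--     layer_kws = ["Controller", "Service", "ServiceImpl", "Dao", "DAO",
--                  "Mapper", "Vo", "VO", "impl/", "Impl"]
--     common_kws = ["Egov", "egov", "common/", "cmm/", "util/"]
--
--     def tier(path: str) -> int:
--         if any(k in path for k in config_kws):
--             return 3
--         if any(k in path for k in layer_kws):
--             return 2
--         if any(k in path for k in common_kws):
--             return 1
--         return 0
--
--     return ([f for f in files if tier(f) == 3]
--             + [f for f in files if tier(f) == 2]
--             + [f for f in files if tier(f) == 1]
--             + [f for f in files if tier(f) == 0])
-- ===== Notes on version B (the rewrite author's own statement) =====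
-- stated objective: alternative
-- what changed: Replaces sorted(files, key=..., reverse=True) with four filter passes (one list comprehension per priority tier, concatenated high-to-low) and replaces the dict-driven key loop with an if-chain over three named keyword lists; each pass keeps input order, which reproduces the stable reverse sort exactly.
import Mathlib
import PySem

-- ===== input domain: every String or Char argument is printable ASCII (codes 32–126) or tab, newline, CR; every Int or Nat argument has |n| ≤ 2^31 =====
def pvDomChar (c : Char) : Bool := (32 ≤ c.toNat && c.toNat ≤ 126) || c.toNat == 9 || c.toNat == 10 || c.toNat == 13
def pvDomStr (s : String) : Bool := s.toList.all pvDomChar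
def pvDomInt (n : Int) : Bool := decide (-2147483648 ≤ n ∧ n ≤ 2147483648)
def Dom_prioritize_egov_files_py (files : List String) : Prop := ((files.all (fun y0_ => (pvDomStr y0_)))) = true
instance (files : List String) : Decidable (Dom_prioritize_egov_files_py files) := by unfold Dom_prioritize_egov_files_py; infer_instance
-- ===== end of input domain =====

-- B replaces the stable reverse comparison sort with four staged filter passes concatenated
-- high-to-low, and the dict-driven key loop with an if-chain over named keyword lists
-- (objective: alternative algorithm, same result).


-- ===== PORT A =====
-- A's priority_keywords dict, in Python's insertion order
def pvPriorityKeywords : List (Int × List String) :=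
  [(3, ["context-", "web.xml", "dispatcher-servlet", ".properties",
        "application.yml", "application.yaml", "pom.xml", "build.gradle"]),
   (2, ["Controller", "Service", "ServiceImpl", "Dao", "DAO",
        "Mapper", "Vo", "VO", "impl/", "Impl"]),
   (1, ["Egov", "egov", "common/", "cmm/", "util/"])]

-- A's 'for priority, keywords in priority_keywords.items(): … return priority' loop
def pvFilePriorityLoop (items : List (Int × List String)) (path : String) : Int :=
  match items with
  | [] => 0
  | (priority, keywords) :: rest =>
      if keywords.any (fun kw => PySem.Str.isIn kw path) then priority
      else pvFilePriorityLoop rest path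

-- A's file_priority
def pvFilePriority (path : String) : Int := pvFilePriorityLoop pvPriorityKeywords path

def prioritize_egov_files_py (files : List String) : List String :=
  PySem.List.sorted files pvFilePriority true

-- ===== PORT B =====
-- B's three named keyword lists
def pvConfigKws : List String :=
  ["context-", "web.xml", "dispatcher-servlet", ".properties",
   "application.yml", "application.yaml", "pom.xml", "build.gradle"]
def pvLayerKws : List String :=
  ["Controller", "Service", "ServiceImpl", "Dao", "DAO",
   "Mapper", "Vo", "VO", "impl/", "Impl"]
def pvCommonKws : List String :=
  ["Egov", "egov", "common/", "cmm/", "util/"]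

-- B's tier: an if-chain over the three lists
def pvTier (path : String) : Int :=
  if pvConfigKws.any (fun k => PySem.Str.isIn k path) then 3
  else if pvLayerKws.any (fun k => PySem.Str.isIn k path) then 2
  else if pvCommonKws.any (fun k => PySem.Str.isIn k path) then 1
  else 0

def prioritize_egov_files_py_alt (files : List String) : List String :=
  files.filter (fun f => pvTier f == 3)
    ++ files.filter (fun f => pvTier f == 2)
    ++ files.filter (fun f => pvTier f == 1)
    ++ files.filter (fun f => pvTier f == 0)

-- ===== PRECONDITION & SPEC =====
def Spec_prioritize_egov_files_py (files : List String) (out : List String) : Prop := out = prioritize_egov_files_py_alt files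
instance (files : List String) (out : List String) : Decidable (Spec_prioritize_egov_files_py files out) := by unfold Spec_prioritize_egov_files_py; infer_instance

-- ===== CLAIM (what is proved, stated in full; the proofs are below) =====
def Claim_equal_prioritize_egov_files_py : Prop := ∀ (files : List String), Dom_prioritize_egov_files_py files → Spec_prioritize_egov_files_py files (prioritize_egov_files_py files)

-- ===== LEMMAS AND PROOFS =====

-- the two key functions agree
theorem pvTier_eq_pvFilePriority (path : String) : pvTier path = pvFilePriority path := by
  unfold pvTier pvFilePriority pvPriorityKeywords pvConfigKws pvLayerKws pvCommonKws
  simp only [pvFilePriorityLoop]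

-- the key takes only the values 0,1,2,3
theorem pvFilePriority_cases (path : String) :
    pvFilePriority path = 0 ∨ pvFilePriority path = 1 ∨
    pvFilePriority path = 2 ∨ pvFilePriority path = 3 := by
  unfold pvFilePriority pvPriorityKeywords
  simp only [pvFilePriorityLoop]
  split_ifs <;> norm_num

-- filter shorthand: the elements of priority k, in input order
def pvBucket (k : Int) (files : List String) : List String :=
  files.filter (fun y => pvFilePriority y = k)

theorem pvBucket_append (k : Int) (p : List String) (x : String) :
    pvBucket k (p ++ [x]) = pvBucket k p ++ if pvFilePriority x = k then [x] else [] := by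
  simp [pvBucket, List.filter_append]
  split_ifs <;> simp_all

theorem mem_pvBucket_key {k : Int} {p : List String} {y : String}
    (h : y ∈ pvBucket k p) : pvFilePriority y = k := by
  have := List.of_mem_filter h
  simpa using this

-- insertion skips a block the new element does not go before
theorem insertBy_append_left (before : String → String → Bool) (x : String)
    (A B : List String) (hA : ∀ a ∈ A, before x a = false) :
    PySem.List.insertBy before x (A ++ B) = A ++ PySem.List.insertBy before x B := by
  induction A with
  | nil => simp
  | cons a A ih =>
      have ha : before x a = false := hA a (by simp)
      simp [PySem.List.insertBy, ha, ih (fun a h => hA a (by simp [h]))]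

theorem insertBy_cons_of_before (before : String → String → Bool) (x b : String)
    (B : List String) (hb : before x b = true) :
    PySem.List.insertBy before x (b :: B) = x :: b :: B := by
  simp [PySem.List.insertBy, hb]

-- inserting an element whose key beats the whole list puts it at the front
theorem insertBy_front (x : String) (B : List String)
    (hB : ∀ b ∈ B, pvFilePriority b < pvFilePriority x) :
    PySem.List.insertBy (fun a b => decide (pvFilePriority b < pvFilePriority a)) x B
      = x :: B := by
  cases B with
  | nil => simp [PySem.List.insertBy]
  | cons b B' => exact insertBy_cons_of_before _ x b B' (by simp [hB b (by simp)])

-- A's sorted list is exactly the four priority buckets concatenated high-to-low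
theorem sorted_eq_buckets (files : List String) :
    PySem.List.sorted files pvFilePriority true =
      pvBucket 3 files ++ pvBucket 2 files ++ pvBucket 1 files ++ pvBucket 0 files := by
  rw [PySem.List.sorted_rev_eq_foldl_insertBy]
  induction files using List.reverseRecOn with
  | nil => simp [pvBucket]
  | append_singleton p x ih =>
      rw [List.foldl_append, List.foldl_cons, List.foldl_nil, ih]
      have skip3 : ∀ a ∈ pvBucket 3 p,
          (decide (pvFilePriority a < pvFilePriority x) : Bool) = false := by
        intro a ha; have := mem_pvBucket_key ha
        rcases pvFilePriority_cases x with hx | hx | hx | hx <;> simp [this, hx]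
      rcases pvFilePriority_cases x with hx | hx | hx | hx
      · -- priority 0: goes at the very end
        have h0 : ∀ y ∈ pvBucket 3 p ++ pvBucket 2 p ++ pvBucket 1 p ++ pvBucket 0 p,
            (decide (pvFilePriority y < pvFilePriority x) : Bool) = false := by
          intro y hy
          simp only [List.mem_append] at hy
          rcases hy with ((h | h) | h) | h <;>
            (have := mem_pvBucket_key h; simp [this, hx])
        rw [PySem.List.insertBy_of_forall_not_before
              (fun a b => decide (pvFilePriority b < pvFilePriority a)) x
              (pvBucket 3 p ++ pvBucket 2 p ++ pvBucket 1 p ++ pvBucket 0 p) h0]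
        simp [pvBucket_append, hx]
      · -- priority 1: after buckets 3,2,1, before bucket 0
        rw [insertBy_append_left (fun a b => decide (pvFilePriority b < pvFilePriority a)) x
              (pvBucket 3 p ++ pvBucket 2 p ++ pvBucket 1 p) (pvBucket 0 p)
              (fun a ha => by
                rcases (List.mem_append.1 ha) with h | h
                · rcases (List.mem_append.1 h) with h' | h' <;>
                    (have := mem_pvBucket_key h'; simp [this, hx])
                · have := mem_pvBucket_key h; simp [this, hx]),
            insertBy_front x (pvBucket 0 p) (fun b hb => by
                have := mem_pvBucket_key hb; simp [this, hx])]
        simp [pvBucket_append, hx]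
      · -- priority 2: after buckets 3,2, before buckets 1,0
        rw [List.append_assoc (pvBucket 3 p ++ pvBucket 2 p) (pvBucket 1 p) (pvBucket 0 p),
            insertBy_append_left (fun a b => decide (pvFilePriority b < pvFilePriority a)) x
              (pvBucket 3 p ++ pvBucket 2 p) (pvBucket 1 p ++ pvBucket 0 p)
              (fun a ha => by
                rcases (List.mem_append.1 ha) with h | h <;>
                  (have := mem_pvBucket_key h; simp [this, hx])),
            insertBy_front x (pvBucket 1 p ++ pvBucket 0 p) (fun b hb => by
                rcases (List.mem_append.1 hb) with h | h <;>
                  (have := mem_pvBucket_key h; simp [this, hx]))]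
        simp [pvBucket_append, hx]
      · -- priority 3: after bucket 3, before buckets 2,1,0
        rw [List.append_assoc (pvBucket 3 p ++ pvBucket 2 p) (pvBucket 1 p) (pvBucket 0 p),
            List.append_assoc (pvBucket 3 p) (pvBucket 2 p) (pvBucket 1 p ++ pvBucket 0 p),
            insertBy_append_left (fun a b => decide (pvFilePriority b < pvFilePriority a)) x
              (pvBucket 3 p) (pvBucket 2 p ++ (pvBucket 1 p ++ pvBucket 0 p)) skip3,
            insertBy_front x (pvBucket 2 p ++ (pvBucket 1 p ++ pvBucket 0 p)) (fun b hb => by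
                simp only [List.mem_append] at hb
                rcases hb with h | h | h <;>
                  (have := mem_pvBucket_key h; simp [this, hx]))]
        simp [pvBucket_append, hx]

-- B's filters are the same buckets
theorem filter_tier_eq_bucket (k : Int) (files : List String) :
    files.filter (fun f => pvTier f == k) = pvBucket k files := by
  unfold pvBucket
  apply List.filter_congr
  intro f _
  rw [pvTier_eq_pvFilePriority]
  by_cases h : pvFilePriority f = k <;> simp [h]

-- ===== VERDICT (by name: the statement is the Claim_ definition above) =====
theorem prioritize_egov_files_py_spec : Claim_equal_prioritize_egov_files_py := by
  intro files _
  unfold Spec_prioritize_egov_files_py prioritize_egov_files_py prioritize_egov_files_py_alt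
  rw [sorted_eq_buckets, filter_tier_eq_bucket, filter_tier_eq_bucket,
      filter_tier_eq_bucket, filter_tier_eq_bucket]
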